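-- pv_equiv track=rewrite | github.com/setheum/setheum | scripts/prdoc.py | map_files_to_crates
-- ===== SOURCE A (Python) =====
-- def map_files_to_crates(files, workspace_crates):
--     affected_crates = set()
--     # Sort crates by path length descending to match most specific path first
--     sorted_crates = sorted(workspace_crates.items(), key=lambda x: len(x[1]), reverse=True)
--
--     for file_path in files:
--         for name, path in sorted_crates:
--             if not path: # root crate
--                 continue
--             if file_path.startswith(path + "/"):
--                 affected_crates.add(name)
--                 break
--         else:
--             # If no specific crate path matched, it might be the root crate
--             # But usually we only care about sub-crates in a workspace
--             pass
--     return sorted(list(affected_crates))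
-- ===== SOURCE B (Python) =====
-- def map_files_to_crates(files, workspace_crates):
--     # Index crates by path once; for each file scan its '/' boundaries from the
--     # deepest outward and take the first (= most specific) crate hit.
--     crate_by_path = {}
--     for name, path in workspace_crates.items():
--         if path and path not in crate_by_path:
--             crate_by_path[path] = name
--     affected = set()
--     for file_path in files:
--         for i in range(len(file_path) - 1, -1, -1):
--             if file_path[i] == "/":
--                 name = crate_by_path.get(file_path[:i])
--                 if name is not None:
--                     affected.add(name)
--                     break
--     return sorted(affected)
-- ===== Notes on version B (the rewrite author's own statement) =====
-- stated objective: faster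
-- what changed: Instead of sorting all crates by path length and scanning the whole crate list per file, B builds a path->crate dict once and for each file walks its '/' boundaries deepest-first, taking the first dict hit.
import Mathlib
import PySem

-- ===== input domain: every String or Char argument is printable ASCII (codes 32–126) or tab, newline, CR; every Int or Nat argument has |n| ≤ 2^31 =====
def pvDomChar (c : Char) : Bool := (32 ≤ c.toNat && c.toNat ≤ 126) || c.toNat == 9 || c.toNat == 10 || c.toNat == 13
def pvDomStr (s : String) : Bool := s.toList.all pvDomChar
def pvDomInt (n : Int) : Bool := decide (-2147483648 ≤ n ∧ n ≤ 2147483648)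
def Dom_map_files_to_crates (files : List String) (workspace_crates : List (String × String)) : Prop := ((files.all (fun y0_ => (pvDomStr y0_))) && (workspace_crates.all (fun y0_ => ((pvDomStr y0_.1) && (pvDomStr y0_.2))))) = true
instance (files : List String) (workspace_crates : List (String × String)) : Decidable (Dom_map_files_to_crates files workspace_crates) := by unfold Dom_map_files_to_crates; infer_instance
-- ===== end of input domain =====

-- B replaces A's per-file scan over all length-sorted crates by a one-off path→crate
-- dictionary and a deepest-first walk over each file's '/' boundaries (objective: faster).

-- ===== PORT A =====
-- inner 'for name, path in sorted_crates: …' loop with its break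
def pvLoopA (file_path : String) : List (String × String) → PySem.Set String → PySem.Set String
  | [], acc => acc
  | (name, path) :: rest, acc =>
    if path = "" then pvLoopA file_path rest acc
    else if PySem.Chars.startswith file_path.toList (path.toList ++ ['/']) then PySem.Set.add acc name
    else pvLoopA file_path rest acc
-- 'path + "/"' is ported as 'path.toList ++ ['/']' (exact: Python string concat is list-of-chars append)

def map_files_to_crates (files : List String) (workspace_crates : List (String × String)) : List String :=
  let sorted_crates := PySem.List.sorted workspace_crates (fun x => PySem.Str.len x.2) true
  let affected := files.foldl (fun acc file_path => pvLoopA file_path sorted_crates acc) PySem.Set.empty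
  PySem.List.sorted affected (fun x => x) false

-- ===== PORT B =====
-- 'for name, path in workspace_crates.items(): if path and path not in crate_by_path: …'
def pvCrateDict (workspace_crates : List (String × String)) : PySem.Dict String String :=
  workspace_crates.foldl
    (fun d e => if e.2 ≠ "" ∧ d.contains e.2 = false then d.insert e.2 e.1 else d)
    PySem.Dict.empty

-- Source B's 'for i in range(len(file_path)-1, -1, -1): if file_path[i] == "/": …' scans the
-- characters right-to-left; this recursion over the reversed character list visits the same
-- positions in the same order, and file_path[:i] is rs.reverse.
def pvWalkB (d : PySem.Dict String String) : List Char → Option String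
  | [] => none
  | c :: rs =>
    if c = '/' then
      match d.get? (String.ofList rs.reverse) with
      | some nm => some nm
      | none => pvWalkB d rs
    else pvWalkB d rs

def map_files_to_crates_alt (files : List String) (workspace_crates : List (String × String)) : List String :=
  let crate_by_path := pvCrateDict workspace_crates
  let affected := files.foldl
    (fun acc file_path =>
      match pvWalkB crate_by_path file_path.toList.reverse with
      | some nm => PySem.Set.add acc nm
      | none => acc)
    PySem.Set.empty
  PySem.List.sorted affected (fun x => x) false

-- ===== PRECONDITION & SPEC =====
def Spec_map_files_to_crates (files : List String) (workspace_crates : List (String × String)) (out : List String) : Prop := out = map_files_to_crates_alt files workspace_crates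
instance (files : List String) (workspace_crates : List (String × String)) (out : List String) : Decidable (Spec_map_files_to_crates files workspace_crates out) := by unfold Spec_map_files_to_crates; infer_instance

-- ===== CLAIM (what is proved, stated in full; the proofs are below) =====
def Claim_equal_map_files_to_crates : Prop := ∀ (files : List String) (workspace_crates : List (String × String)), Dom_map_files_to_crates files workspace_crates → Spec_map_files_to_crates files workspace_crates (map_files_to_crates files workspace_crates)

-- ===== LEMMAS AND PROOFS =====

-- the match test A applies to a crate entry, as a Bool predicate on the entry
def pvQ (f : List Char) (e : String × String) : Bool :=
  !(e.2 == "") && PySem.Chars.startswith f (e.2.toList ++ ['/'])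

-- "first entry of maximal path length among those passing q", as a left fold
def pvStep (q : String × String → Bool) (acc : Option (String × String)) (e : String × String) :
    Option (String × String) :=
  if q e then
    match acc with
    | none => some e
    | some b => if PySem.Str.len b.2 < PySem.Str.len e.2 then some e else some b
  else acc

def pvBest (q : String × String → Bool) (L : List (String × String)) : Option (String × String) :=
  L.foldl (pvStep q) none

lemma pvQ_true_iff (f : List Char) (e : String × String) :
    pvQ f e = true ↔ e.2 ≠ "" ∧ (e.2.toList ++ ['/']) <+: f := by
  simp [pvQ, PySem.Chars.startswith_iff]

lemma pvPrefix_eq {f p1 p2 : List Char} (h1 : p1 <+: f) (h2 : p2 <+: f)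
    (hl : p1.length = p2.length) : p1 = p2 :=
  (List.prefix_of_prefix_length_le h1 h2 (le_of_eq hl)).eq_of_length hl

-- A's inner loop is find? over the (sorted) entry list
lemma pvLoopA_eq_find (fp : String) (l : List (String × String)) (acc : PySem.Set String) :
    pvLoopA fp l acc
      = match l.find? (pvQ fp.toList) with
        | some e => PySem.Set.add acc e.1
        | none => acc := by
  induction l with
  | nil => simp [pvLoopA]
  | cons e rest ih =>
    obtain ⟨name, path⟩ := e
    by_cases hp : path = ""
    · have hq : pvQ fp.toList (name, path) = false := by simp [pvQ, hp]
      rw [List.find?_cons_of_neg (by simp [hq]), ← ih]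
      simp [pvLoopA, hp]
    · cases hs : PySem.Chars.startswith fp.toList (path.toList ++ ['/']) with
      | true =>
        have hq : pvQ fp.toList (name, path) = true := by simp [pvQ, hp, hs]
        rw [List.find?_cons_of_pos hq]
        simp [pvLoopA, hp, hs]
      | false =>
        have hq : pvQ fp.toList (name, path) = false := by simp [pvQ, hs]
        rw [List.find?_cons_of_neg (by simp [hq]), ← ih]
        simp [pvLoopA, hp, hs]

lemma pvInsertBy_cons (before : (String × String) → (String × String) → Bool)
    (x y : String × String) (ys : List (String × String)) :
    PySem.List.insertBy before x (y :: ys)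
      = if before x y then x :: y :: ys else y :: PySem.List.insertBy before x ys := by
  simp [PySem.List.insertBy]

-- find? through one stable descending insertion
lemma pvFind_insertBy (q : String × String → Bool) (x : String × String) :
    ∀ (s : List (String × String)),
      s.Pairwise (fun a b => PySem.Str.len b.2 ≤ PySem.Str.len a.2) →
      List.find? q
          (PySem.List.insertBy
            (fun a b => decide (PySem.Str.len b.2 < PySem.Str.len a.2)) x s)
        = pvStep q (List.find? q s) x := by
  intro s
  induction s with
  | nil =>
    intro _
    cases hq : q x <;> simp [PySem.List.insertBy, pvStep, List.find?, hq]
  | cons y ys ih =>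
    intro hpw
    rw [List.pairwise_cons] at hpw
    obtain ⟨hy, hpw'⟩ := hpw
    rw [pvInsertBy_cons]
    by_cases hlt : PySem.Str.len y.2 < PySem.Str.len x.2
    · rw [if_pos (by simpa using hlt)]
      cases hq : q x with
      | true =>
        cases hfy : List.find? q (y :: ys) with
        | none =>
          rw [List.find?_cons_of_pos hq]
          simp [pvStep, hq]
        | some b =>
          have hb : b ∈ y :: ys := List.mem_of_find?_eq_some hfy
          have hble : PySem.Str.len b.2 ≤ PySem.Str.len y.2 := by
            rcases List.mem_cons.mp hb with rfl | hb'
            · exact le_refl _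
            · exact hy b hb'
          have hblt : PySem.Str.len b.2 < PySem.Str.len x.2 := lt_of_le_of_lt hble hlt
          rw [List.find?_cons_of_pos hq]
          simp only [pvStep, hq, if_pos trivial]
          rw [if_pos hblt]
      | false =>
        rw [List.find?_cons_of_neg (by simp [hq])]
        simp [pvStep, hq]
    · rw [if_neg (by simpa using hlt)]
      cases hqy : q y with
      | true =>
        rw [List.find?_cons_of_pos hqy, List.find?_cons_of_pos hqy]
        cases hq : q x with
        | false => simp [pvStep, hq]
        | true =>
          simp only [pvStep, hq, if_pos trivial]
          rw [if_neg hlt]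
      | false =>
        rw [List.find?_cons_of_neg (by simp [hqy]), List.find?_cons_of_neg (by simp [hqy])]
        exact ih hpw'

-- find? over the length-descending stable sort = first entry of maximal length
lemma pvFind_sorted (q : String × String → Bool) (L : List (String × String)) :
    List.find? q (PySem.List.sorted L (fun x => PySem.Str.len x.2) true) = pvBest q L := by
  induction L using List.reverseRecOn with
  | nil => simp [PySem.List.sorted, pvBest]
  | append_singleton L x ih =>
    have hs : PySem.List.sorted (L ++ [x]) (fun e => PySem.Str.len e.2) true
        = PySem.List.insertBy (fun a b => decide (PySem.Str.len b.2 < PySem.Str.len a.2)) x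
            (PySem.List.sorted L (fun e => PySem.Str.len e.2) true) := by
      rw [PySem.List.sorted_rev_eq_foldl_insertBy, List.foldl_append, List.foldl_cons,
        List.foldl_nil, ← PySem.List.sorted_rev_eq_foldl_insertBy]
    have hpw := PySem.List.sorted_pairwise_rev (xs := L) (key := fun e => PySem.Str.len e.2)
    rw [hs, pvFind_insertBy q x _ hpw, ih]
    simp [pvBest, List.foldl_append]

lemma pvBest_none (q : String × String → Bool) :
    ∀ (L : List (String × String)) (acc : Option (String × String)),
      (∀ e ∈ L, q e = false) → L.foldl (pvStep q) acc = acc := by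
  intro L
  induction L with
  | nil => intro _ _; rfl
  | cons e rest ih =>
    intro acc h
    have he := h e (by simp)
    simp only [List.foldl_cons, pvStep, he]
    exact ih acc (fun x hx => h x (by simp [hx]))

lemma pvBest_congr (q q' : String × String → Bool) :
    ∀ (L : List (String × String)) (acc : Option (String × String)),
      (∀ e ∈ L, q e = q' e) → L.foldl (pvStep q) acc = L.foldl (pvStep q') acc := by
  intro L
  induction L with
  | nil => intro _ _; rfl
  | cons e rest ih =>
    intro acc h
    have he := h e (by simp)
    simp only [List.foldl_cons, pvStep, he]
    exact ih _ (fun x hx => h x (by simp [hx]))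

lemma pvBest_keep (q : String × String → Bool) :
    ∀ (L : List (String × String)) (b : String × String),
      (∀ x ∈ L, q x = true → PySem.Str.len x.2 ≤ PySem.Str.len b.2) →
      L.foldl (pvStep q) (some b) = some b := by
  intro L
  induction L with
  | nil => intro _ _; rfl
  | cons x rest ih =>
    intro b h
    cases hq : q x with
    | false =>
      simp only [List.foldl_cons, pvStep, hq]
      exact ih b (fun y hy => h y (by simp [hy]))
    | true =>
      have hle := h x (by simp) hq
      simp only [List.foldl_cons, pvStep, hq]
      rw [if_pos trivial, if_neg (not_lt.mpr hle)]
      exact ih b (fun y hy => h y (by simp [hy]))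

lemma pvBest_reach (q : String × String → Bool) (P : String) :
    ∀ (L : List (String × String)) (b : String × String),
      (∀ e ∈ L, e.2 = P → q e = true) →
      (∀ e ∈ L, q e = true → e.2.toList.length ≤ P.toList.length) →
      (∀ e ∈ L, q e = true → e.2.toList.length = P.toList.length → e.2 = P) →
      (∃ e ∈ L, e.2 = P) →
      b.2.toList.length < P.toList.length →
      L.foldl (pvStep q) (some b) = L.find? (fun e => e.2 == P) := by
  intro L
  induction L with
  | nil => intro b _ _ _ hex _; simp at hex
  | cons x rest ih =>
    intro b hq hmax heq hex hblt
    by_cases hx : x.2 = P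
    · have hqx : q x = true := hq x (by simp) hx
      have hlt : PySem.Str.len b.2 < PySem.Str.len x.2 := by
        simp only [PySem.Str.len, hx]
        exact_mod_cast hblt
      rw [List.find?_cons_of_pos (by simp [hx])]
      simp only [List.foldl_cons, pvStep, hqx]
      rw [if_pos trivial, if_pos hlt]
      exact pvBest_keep q rest x (fun y hy hqy => by
        have := hmax y (by simp [hy]) hqy
        simp only [PySem.Str.len, hx]
        exact_mod_cast this)
    · have hex' : ∃ e ∈ rest, e.2 = P := by
        rcases hex with ⟨e, he, hep⟩
        rcases List.mem_cons.mp he with rfl | he'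
        · exact absurd hep hx
        · exact ⟨e, he', hep⟩
      rw [List.find?_cons_of_neg (by simp [hx])]
      cases hqx : q x with
      | false =>
        simp only [List.foldl_cons, pvStep, hqx]
        exact ih b (fun y hy => hq y (by simp [hy])) (fun y hy => hmax y (by simp [hy]))
          (fun y hy => heq y (by simp [hy])) hex' hblt
      | true =>
        have hxlt : x.2.toList.length < P.toList.length := by
          have hle := hmax x (by simp) hqx
          rcases lt_or_eq_of_le hle with h | h
          · exact h
          · exact absurd (heq x (by simp) hqx h) hx
        simp only [List.foldl_cons, pvStep, hqx]
        rw [if_pos trivial]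
        by_cases hlt : PySem.Str.len b.2 < PySem.Str.len x.2
        · rw [if_pos hlt]
          exact ih x (fun y hy => hq y (by simp [hy])) (fun y hy => hmax y (by simp [hy]))
            (fun y hy => heq y (by simp [hy])) hex' hxlt
        · rw [if_neg hlt]
          exact ih b (fun y hy => hq y (by simp [hy])) (fun y hy => hmax y (by simp [hy]))
            (fun y hy => heq y (by simp [hy])) hex' hblt

lemma pvBest_first_max (q : String × String → Bool) (P : String)
    (L : List (String × String))
    (hq : ∀ e ∈ L, e.2 = P → q e = true)
    (hmax : ∀ e ∈ L, q e = true → e.2.toList.length ≤ P.toList.length)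
    (heq : ∀ e ∈ L, q e = true → e.2.toList.length = P.toList.length → e.2 = P)
    (hex : ∃ e ∈ L, e.2 = P) :
    pvBest q L = L.find? (fun e => e.2 == P) := by
  induction L with
  | nil => simp at hex
  | cons x rest ih =>
    by_cases hx : x.2 = P
    · have hqx : q x = true := hq x (by simp) hx
      rw [List.find?_cons_of_pos (by simp [hx])]
      simp only [pvBest, List.foldl_cons, pvStep, hqx]
      rw [if_pos trivial]
      exact pvBest_keep q rest x (fun y hy hqy => by
        have := hmax y (by simp [hy]) hqy
        simp only [PySem.Str.len, hx]
        exact_mod_cast this)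
    · have hex' : ∃ e ∈ rest, e.2 = P := by
        rcases hex with ⟨e, he, hep⟩
        rcases List.mem_cons.mp he with rfl | he'
        · exact absurd hep hx
        · exact ⟨e, he', hep⟩
      rw [List.find?_cons_of_neg (by simp [hx])]
      cases hqx : q x with
      | false =>
        simp only [pvBest, List.foldl_cons, pvStep, hqx]
        exact ih (fun y hy => hq y (by simp [hy])) (fun y hy => hmax y (by simp [hy]))
          (fun y hy => heq y (by simp [hy])) hex'
      | true =>
        have hxlt : x.2.toList.length < P.toList.length := by
          have hle := hmax x (by simp) hqx
          rcases lt_or_eq_of_le hle with h | h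
          · exact h
          · exact absurd (heq x (by simp) hqx h) hx
        simp only [pvBest, List.foldl_cons, pvStep, hqx]
        rw [if_pos trivial]
        exact pvBest_reach q P rest x (fun y hy => hq y (by simp [hy]))
          (fun y hy => hmax y (by simp [hy])) (fun y hy => heq y (by simp [hy])) hex' hxlt

-- the first-insertion-wins dictionary looked up at a nonempty path is find? on the entry list
lemma pvDict_get_aux (P : String) (hP : P ≠ "") :
    ∀ (L : List (String × String)) (d0 : PySem.Dict String String),
      (L.foldl (fun d e => if e.2 ≠ "" ∧ d.contains e.2 = false then d.insert e.2 e.1 else d) d0).get? P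
        = match d0.get? P with
          | some v => some v
          | none => (L.find? (fun e => e.2 == P)).map (·.1) := by
  intro L
  induction L with
  | nil => intro d0; cases h0 : d0.get? P <;> simp [h0]
  | cons e rest ih =>
    intro d0
    by_cases hg : e.2 ≠ "" ∧ d0.contains e.2 = false
    · rw [List.foldl_cons, if_pos hg, ih]
      by_cases hPe : P = e.2
      · have h0 : d0.get? P = none := by
          have hc := hg.2
          rw [PySem.Dict.contains_eq_isSome_get?] at hc
          rw [hPe]
          exact Option.not_isSome_iff_eq_none.mp (by simp [hc])
        rw [h0, PySem.Dict.get?_insert, if_pos hPe,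
          List.find?_cons_of_pos (by simp [hPe.symm])]
        rfl
      · rw [PySem.Dict.get?_insert, if_neg hPe,
          List.find?_cons_of_neg (by simp; intro h; exact hPe h.symm)]
    · rw [List.foldl_cons, if_neg hg, ih]
      cases h0 : d0.get? P with
      | some v => rfl
      | none =>
        have hskip : (e.2 == P) = false := by
          rcases not_and_or.mp hg with he | hc
          · push Not at he
            rw [he]
            simpa using Ne.symm hP
          · have hc' : d0.contains e.2 = true := by
              cases h : d0.contains e.2
              · exact absurd h hc
              · rfl
            rw [PySem.Dict.contains_eq_isSome_get?] at hc'
            simp only [beq_eq_false_iff_ne, ne_eq]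
            intro hep
            rw [hep, h0] at hc'
            simp at hc'
        rw [List.find?_cons_of_neg (by simp [hskip])]

-- get? at a nonempty path
lemma pvDict_get (L : List (String × String)) (P : String) (hP : P ≠ "") :
    (pvCrateDict L).get? P = (L.find? (fun e => e.2 == P)).map (·.1) := by
  rw [pvCrateDict, pvDict_get_aux P hP, PySem.Dict.get?_empty]

-- get? at the empty path is always none
lemma pvDict_get_nil_aux :
    ∀ (L : List (String × String)) (d0 : PySem.Dict String String),
      d0.get? "" = none →
      (L.foldl (fun d e => if e.2 ≠ "" ∧ d.contains e.2 = false then d.insert e.2 e.1 else d) d0).get? "" = none := by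
  intro L
  induction L with
  | nil => intro d0 h; exact h
  | cons e rest ih =>
    intro d0 h
    by_cases hg : e.2 ≠ "" ∧ d0.contains e.2 = false
    · rw [List.foldl_cons, if_pos hg]
      exact ih _ (by rw [PySem.Dict.get?_insert, if_neg (fun hh => hg.1 hh.symm)]; exact h)
    · rw [List.foldl_cons, if_neg hg]
      exact ih _ h

lemma pvDict_get_nil (L : List (String × String)) :
    (pvCrateDict L).get? "" = none := by
  rw [pvCrateDict]
  exact pvDict_get_nil_aux L _ (PySem.Dict.get?_empty _)

-- the walk over the reversed character list computes the best match of bounded length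
lemma pvWalk_spec (L : List (String × String)) (f : List Char) :
    ∀ (rs u : List Char), f = rs.reverse ++ u →
      pvWalkB (pvCrateDict L) rs
        = (pvBest (fun e => pvQ f e && decide (e.2.toList.length < rs.length)) L).map (·.1) := by
  intro rs
  induction rs with
  | nil =>
    intro u hf
    have : pvBest (fun e => pvQ f e && decide (e.2.toList.length < ([] : List Char).length)) L
        = none := pvBest_none _ L none (fun e _ => by simp)
    rw [this]
    rfl
  | cons c rs' ih =>
    intro u hf
    have hf' : f = rs'.reverse ++ (c :: u) := by simpa using hf
    by_cases hc : c = '/'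
    · cases hget : (pvCrateDict L).get? (String.ofList rs'.reverse) with
      | some nm =>
        -- a hit: the longest-bounded best is exactly the first entry with this path
        have hQne : String.ofList rs'.reverse ≠ "" := by
          intro h
          rw [h, pvDict_get_nil] at hget
          cases hget
        have hfind := pvDict_get L _ hQne
        rw [hget] at hfind
        obtain ⟨e0, hfe0, he0⟩ := (Option.map_eq_some_iff).mp hfind.symm
        have hQl : (String.ofList rs'.reverse).toList = rs'.reverse := String.toList_ofList
        have hlen : (String.ofList rs'.reverse).toList.length = rs'.length := by
          rw [hQl]; simp
        have hbf := pvBest_first_max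
          (fun e => pvQ f e && decide (e.2.toList.length < (c :: rs').length))
          (String.ofList rs'.reverse) L
          (by
            intro e _ hep
            have hpre : (e.2.toList ++ ['/']) <+: f := by
              rw [hep, hQl, hf', hc]
              exact ⟨u, by simp⟩
            have hq : pvQ f e = true := (pvQ_true_iff f e).mpr ⟨hep ▸ hQne, hpre⟩
            simp [hq, hep, hQl]
          )
          (by
            intro e _ hqe
            simp only [Bool.and_eq_true, decide_eq_true_eq] at hqe
            rw [hlen]
            have := hqe.2
            simp only [List.length_cons] at this
            omega)
          (by
            intro e _ hqe hl
            simp only [Bool.and_eq_true] at hqe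
            obtain ⟨hne, hpre⟩ := (pvQ_true_iff f e).mp hqe.1
            have hpre' : e.2.toList <+: f := (List.prefix_append _ _).trans hpre
            have hpre'' : rs'.reverse <+: f := ⟨c :: u, hf'.symm⟩
            have := pvPrefix_eq hpre' hpre'' (by rw [hl, hlen]; simp)
            rw [← String.toList_inj, hQl]
            exact this)
          ⟨e0, List.mem_of_find?_eq_some hfe0, by simpa using List.find?_some hfe0⟩
        rw [show pvWalkB (pvCrateDict L) (c :: rs') = some nm by
          simp [pvWalkB, hc, hget]]
        rw [hbf, hfe0]
        simp [he0]
      | none =>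
        -- no crate at this boundary: drop to the next one
        have hnone : ∀ e ∈ L, e.2.toList = rs'.reverse → e.2 ≠ "" → False := by
          intro e he hel hene
          have hQne : String.ofList rs'.reverse ≠ "" := by
            intro h
            apply hene
            rw [← String.ofList_toList (s := e.2), hel, h]
          have := pvDict_get L _ hQne
          rw [hget] at this
          have hfn := List.find?_eq_none.mp (Option.map_eq_none_iff.mp this.symm) e he
          apply hfn
          simp [← String.toList_inj, String.toList_ofList, hel]
        have hcongr : ∀ e ∈ L,
            (pvQ f e && decide (e.2.toList.length < (c :: rs').length))
              = (pvQ f e && decide (e.2.toList.length < rs'.length)) := by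
          intro e he
          cases hq : pvQ f e with
          | false => simp
          | true =>
            obtain ⟨hne, hpre⟩ := (pvQ_true_iff f e).mp hq
            have hneq : e.2.toList.length ≠ rs'.length := by
              intro hl
              apply hnone e he _ hne
              have hpre' : e.2.toList <+: f := (List.prefix_append _ _).trans hpre
              have hpre'' : rs'.reverse <+: f := ⟨c :: u, hf'.symm⟩
              exact pvPrefix_eq hpre' hpre'' (by rw [hl]; simp)
            simp only [List.length_cons, Bool.true_and]
            exact decide_eq_decide.mpr (by omega)
        rw [show pvWalkB (pvCrateDict L) (c :: rs') = pvWalkB (pvCrateDict L) rs' by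
          simp [pvWalkB, hc, hget]]
        rw [ih (c :: u) hf', pvBest, pvBest,
          pvBest_congr _ _ L none (fun e he => (hcongr e he).symm)]
    · -- no '/' at this position: no match can end here either
      have hcongr : ∀ e ∈ L,
          (pvQ f e && decide (e.2.toList.length < (c :: rs').length))
            = (pvQ f e && decide (e.2.toList.length < rs'.length)) := by
        intro e he
        cases hq : pvQ f e with
        | false => simp
        | true =>
          obtain ⟨hne, hpre⟩ := (pvQ_true_iff f e).mp hq
          have hneq : e.2.toList.length ≠ rs'.length := by
            intro hl
            have hpre' : e.2.toList <+: f := (List.prefix_append _ _).trans hpre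
            have hpre'' : rs'.reverse <+: f := ⟨c :: u, hf'.symm⟩
            have hel : e.2.toList = rs'.reverse := pvPrefix_eq hpre' hpre'' (by rw [hl]; simp)
            obtain ⟨t, ht⟩ := hpre
            rw [hel] at ht
            rw [hf'] at ht
            simp only [List.append_assoc] at ht
            have h2 := List.append_cancel_left ht
            rw [List.singleton_append] at h2
            injection h2 with h3 _
            exact hc h3.symm
          simp only [List.length_cons, Bool.true_and]
          exact decide_eq_decide.mpr (by omega)
      rw [show pvWalkB (pvCrateDict L) (c :: rs') = pvWalkB (pvCrateDict L) rs' by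
        simp [pvWalkB, hc]]
      rw [ih (c :: u) hf', pvBest, pvBest,
        pvBest_congr _ _ L none (fun e he => (hcongr e he).symm)]

-- per file: B's walk returns exactly the crate name A's scan picks
lemma pvPerFile (L : List (String × String)) (fp : String) :
    pvWalkB (pvCrateDict L) fp.toList.reverse = (pvBest (pvQ fp.toList) L).map (·.1) := by
  rw [pvWalk_spec L fp.toList fp.toList.reverse [] (by simp)]
  congr 1
  apply pvBest_congr
  intro e _
  cases hq : pvQ fp.toList e with
  | false => simp
  | true =>
    obtain ⟨_, hpre⟩ := (pvQ_true_iff fp.toList e).mp hq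
    have hlen := hpre.length_le
    simp only [List.length_append, List.length_cons, List.length_nil] at hlen
    simp only [Bool.true_and, List.length_reverse]
    exact decide_eq_true (by omega)

lemma pvPerFileFull (L : List (String × String)) (fp : String) (acc : PySem.Set String) :
    pvLoopA fp (PySem.List.sorted L (fun x => PySem.Str.len x.2) true) acc
      = match pvWalkB (pvCrateDict L) fp.toList.reverse with
        | some nm => PySem.Set.add acc nm
        | none => acc := by
  rw [pvLoopA_eq_find, pvFind_sorted, pvPerFile]
  cases pvBest (pvQ fp.toList) L with
  | none => rfl
  | some e => rfl

-- ===== VERDICT (by name: the statement is the Claim_ definition above) =====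
theorem map_files_to_crates_spec : Claim_equal_map_files_to_crates := by
  intro files L _
  unfold Spec_map_files_to_crates
  show PySem.List.sorted
      (files.foldl (fun acc fp => pvLoopA fp (PySem.List.sorted L (fun x => PySem.Str.len x.2) true) acc)
        PySem.Set.empty) (fun x => x) false
    = PySem.List.sorted
      (files.foldl (fun acc fp =>
          match pvWalkB (pvCrateDict L) fp.toList.reverse with
          | some nm => PySem.Set.add acc nm
          | none => acc) PySem.Set.empty) (fun x => x) false
  have hfold : List.foldl
      (fun acc fp => pvLoopA fp (PySem.List.sorted L (fun x => PySem.Str.len x.2) true) acc)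
      PySem.Set.empty files
    = List.foldl
      (fun acc fp =>
        match pvWalkB (pvCrateDict L) fp.toList.reverse with
        | some nm => PySem.Set.add acc nm
        | none => acc)
      PySem.Set.empty files :=
    PySem.List.foldl_congr_mem files _ _ _ (fun acc fp _ => pvPerFileFull L fp acc)
  rw [hfold]
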